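-- pv_equiv track=rewrite | github.com/crazyjerz/new-holiday-webhook | new-webhook.py | sortl
-- ===== SOURCE A (Python) =====
-- def sortl(l: list[str]) -> list[str]:
--     newl, oldl = [], []
--     for i in l:
--         if i.find("<@&") == -1:
--             newl.append(i)
--         else:
--             oldl.append(i)
--     return newl+oldl
-- ===== SOURCE B (Python) =====
-- def sortl(l: list[str]) -> list[str]:
--     # stable sort on marker presence: marker-free strings (key False) first,
--     # marker-bearing (key True) after, each group in original order
--     return sorted(l, key=lambda x: "<@&" in x)
-- ===== Notes on version B (the rewrite author's own statement) =====
-- stated objective: idiomatic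
-- what changed: Replaced the explicit two-bucket partition loop with a single stable sort keyed on the boolean presence of the '<@&' marker; stability preserves the relative order within each bucket, so the result is identical.
import Mathlib
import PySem

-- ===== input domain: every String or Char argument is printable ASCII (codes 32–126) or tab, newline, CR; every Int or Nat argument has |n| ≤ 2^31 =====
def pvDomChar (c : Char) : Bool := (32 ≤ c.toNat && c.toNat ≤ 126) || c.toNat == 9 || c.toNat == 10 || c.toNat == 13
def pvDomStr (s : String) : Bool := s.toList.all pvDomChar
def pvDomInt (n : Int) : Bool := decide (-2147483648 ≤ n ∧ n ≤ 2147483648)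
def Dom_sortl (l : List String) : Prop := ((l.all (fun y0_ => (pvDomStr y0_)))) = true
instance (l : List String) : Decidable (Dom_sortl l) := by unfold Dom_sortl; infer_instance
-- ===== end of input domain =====

-- B replaces A's two-bucket partition loop with one stable sort keyed on marker presence (idiomatic).

-- ===== PORT A =====
def sortl (l : List String) : List String :=
  let p := l.foldl
    (fun (acc : List String × List String) i =>
      if PySem.Str.find i "<@&" = -1 then (acc.1 ++ [i], acc.2) else (acc.1, acc.2 ++ [i]))
    ([], [])
  p.1 ++ p.2

-- ===== PORT B =====
def sortl_alt (l : List String) : List String :=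
  PySem.List.sorted l (fun x => PySem.Str.isIn "<@&" x) false

-- ===== PRECONDITION & SPEC =====
def Spec_sortl (l : List String) (out : List String) : Prop := out = sortl_alt l
instance (l : List String) (out : List String) : Decidable (Spec_sortl l out) := by unfold Spec_sortl; infer_instance

-- ===== CLAIM (what is proved, stated in full; the proofs are below) =====
def Claim_equal_sortl : Prop := ∀ (l : List String), Dom_sortl l → Spec_sortl l (sortl l)

-- ===== LEMMAS AND PROOFS =====

-- "i.find('<@&') == -1" is the negation of "'<@&' in i"
theorem find_marker_neg_iff (s : String) :
    PySem.Str.find s "<@&" = -1 ↔ PySem.Str.isIn "<@&" s = false := by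
  rw [PySem.Str.find_eq_neg_one_iff]
  constructor
  · intro h
    cases hb : PySem.Str.isIn "<@&" s with
    | false => rfl
    | true => exact absurd ((PySem.Str.isIn_iff_infix "<@&" s).mp hb) h
  · intro h hinf
    rw [(PySem.Str.isIn_iff_infix "<@&" s).mpr hinf] at h
    exact Bool.true_eq_false.mp h

-- one unfolding step of insertBy, with an abstract comparison
theorem insertBy_cons_true {α : Type} (before : α → α → Bool) (x y : α) (ys : List α)
    (h : before x y = true) :
    PySem.List.insertBy before x (y :: ys) = x :: y :: ys := by
  simp [PySem.List.insertBy, h]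

theorem insertBy_cons_false {α : Type} (before : α → α → Bool) (x y : α) (ys : List α)
    (h : before x y = false) :
    PySem.List.insertBy before x (y :: ys) = y :: PySem.List.insertBy before x ys := by
  simp [PySem.List.insertBy, h]

-- inserting a marker-free string into "falses ++ trues" puts it at the end of the falses
theorem insertBy_false (x : String) (hx : PySem.Str.isIn "<@&" x = false) :
    ∀ (n o : List String),
      (∀ s ∈ n, PySem.Str.isIn "<@&" s = false) →
      (∀ s ∈ o, PySem.Str.isIn "<@&" s = true) →
      PySem.List.insertBy
        (fun a b => decide (PySem.Str.isIn "<@&" a < PySem.Str.isIn "<@&" b)) x (n ++ o)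
      = n ++ x :: o := by
  intro n
  induction n with
  | nil =>
    intro o ho
    cases o with
    | nil => intro _; rfl
    | cons y ys =>
      intro hoall
      have hy := hoall y (by simp)
      have hb : decide (PySem.Str.isIn "<@&" x < PySem.Str.isIn "<@&" y) = true := by
        rw [hx, hy]; decide
      exact insertBy_cons_true _ x y ys hb
  | cons y n ih =>
    intro o hn ho
    have hy := hn y (by simp)
    have hb : decide (PySem.Str.isIn "<@&" x < PySem.Str.isIn "<@&" y) = false := by
      rw [hx, hy]; decide
    rw [List.cons_append, insertBy_cons_false _ x y (n ++ o) hb,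
      ih o (fun s hs => hn s (by simp [hs])) ho]
    rfl

-- inserting a marker-bearing string appends it at the very end
theorem insertBy_true (x : String) (hx : PySem.Str.isIn "<@&" x = true) (ys : List String) :
    PySem.List.insertBy
      (fun a b => decide (PySem.Str.isIn "<@&" a < PySem.Str.isIn "<@&" b)) x ys
    = ys ++ [x] := by
  apply PySem.List.insertBy_of_forall_not_before
  intro y _
  show decide (PySem.Str.isIn "<@&" x < PySem.Str.isIn "<@&" y) = false
  rw [hx]
  cases PySem.Str.isIn "<@&" y <;> decide

-- the insertion-sort fold over "falses ++ trues" computes A's two-bucket partition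
theorem fold_partition (l : List String) :
    ∀ (n o : List String),
      (∀ s ∈ n, PySem.Str.isIn "<@&" s = false) →
      (∀ s ∈ o, PySem.Str.isIn "<@&" s = true) →
      l.foldl
        (fun acc x => PySem.List.insertBy
          (fun a b => decide (PySem.Str.isIn "<@&" a < PySem.Str.isIn "<@&" b)) x acc)
        (n ++ o)
      = (l.foldl
          (fun (acc : List String × List String) i =>
            if PySem.Str.find i "<@&" = -1 then (acc.1 ++ [i], acc.2) else (acc.1, acc.2 ++ [i]))
          (n, o)).1
        ++ (l.foldl
          (fun (acc : List String × List String) i =>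
            if PySem.Str.find i "<@&" = -1 then (acc.1 ++ [i], acc.2) else (acc.1, acc.2 ++ [i]))
          (n, o)).2 := by
  induction l with
  | nil => intro n o _ _; rfl
  | cons x t ih =>
    intro n o hn ho
    by_cases hfind : PySem.Str.find x "<@&" = -1
    · have hx : PySem.Str.isIn "<@&" x = false := (find_marker_neg_iff x).mp hfind
      have hins := insertBy_false x hx n o hn ho
      have hn' : ∀ s ∈ n ++ [x], PySem.Str.isIn "<@&" s = false := by
        intro s hs
        rcases List.mem_append.mp hs with h | h
        · exact hn s h
        · simp at h; simpa [h] using hx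
      simp only [List.foldl_cons, if_pos hfind]
      rw [hins, List.append_cons]
      exact ih (n ++ [x]) o hn' ho
    · have hx : PySem.Str.isIn "<@&" x = true := by
        cases hb : PySem.Str.isIn "<@&" x with
        | true => rfl
        | false => exact absurd ((find_marker_neg_iff x).mpr hb) hfind
      have hins := insertBy_true x hx (n ++ o)
      have ho' : ∀ s ∈ o ++ [x], PySem.Str.isIn "<@&" s = true := by
        intro s hs
        rcases List.mem_append.mp hs with h | h
        · exact ho s h
        · simp at h; simpa [h] using hx
      simp only [List.foldl_cons, if_neg hfind]
      rw [hins, List.append_assoc]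
      exact ih n (o ++ [x]) hn ho'

-- ===== VERDICT (by name: the statement is the Claim_ definition above) =====
theorem sortl_spec : Claim_equal_sortl := by
  intro l _
  unfold Spec_sortl sortl sortl_alt
  rw [PySem.List.sorted_eq_foldl_insertBy]
  exact (fold_partition l [] [] (by simp) (by simp)).symm
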